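-- pv_equiv track=rewrite | github.com/JacobOrner/USAFA | CS_431 (Cryptography)/Crypto_GR_Files/backup.py | almost_modular_inverse
-- ===== SOURCE A (Python) =====
-- def almost_modular_inverse(a, remainder, mod, limit=0):
--     if limit == 0:
--         limit = mod
--     possibilities = []
--     for i in range(limit):
--         if a * i % mod == remainder:
--             possibilities.append(i)
--     return possibilities
-- ===== SOURCE B (Python) =====
-- def _egcd(a, b):
--     # extended Euclid: returns (g, x, y) with g = gcd(a, b) and a*x + b*y = g
--     if b == 0:
--         return a, 1, 0
--     g, x, y = _egcd(b, a % b)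
--     return g, y, x - (a // b) * y
--
--
-- def almost_modular_inverse(a, remainder, mod, limit=0):
--     if limit == 0:
--         limit = mod
--     if limit <= 0:
--         return []
--     # remainder must lie in the value range of `% mod`
--     if mod > 0:
--         if not (0 <= remainder < mod):
--             return []
--     else:
--         if not (mod < remainder <= 0):
--             return []
--     m = abs(mod)
--     r = remainder % m
--     g, x, _ = _egcd(a % m, m)
--     if r % g != 0:
--         return []
--     step = m // g
--     x0 = ((r // g) * x) % step
--     return list(range(x0, limit, step))
-- ===== Notes on version B (the rewrite author's own statement) =====
-- stated objective: faster
-- what changed: B solves the linear congruence a*i ≡ remainder (mod mod) with the extended Euclidean algorithm and returns the arithmetic progression of solutions below limit, instead of A's scan testing every i < limit.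
import Mathlib
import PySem

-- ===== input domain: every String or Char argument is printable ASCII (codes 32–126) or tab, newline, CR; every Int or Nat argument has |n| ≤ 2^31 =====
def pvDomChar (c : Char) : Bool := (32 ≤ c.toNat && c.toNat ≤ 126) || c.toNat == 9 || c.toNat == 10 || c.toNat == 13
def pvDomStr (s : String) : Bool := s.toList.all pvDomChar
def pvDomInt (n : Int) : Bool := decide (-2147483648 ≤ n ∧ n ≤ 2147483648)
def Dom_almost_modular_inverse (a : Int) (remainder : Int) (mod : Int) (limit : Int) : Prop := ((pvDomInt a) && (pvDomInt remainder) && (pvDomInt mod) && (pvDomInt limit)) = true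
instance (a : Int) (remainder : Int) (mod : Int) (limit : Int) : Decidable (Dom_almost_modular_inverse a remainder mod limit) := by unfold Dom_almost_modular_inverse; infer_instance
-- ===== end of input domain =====

-- B replaces A's O(limit) scan by solving the linear congruence a*i ≡ remainder (mod mod) with the
-- extended Euclidean algorithm and emitting the arithmetic progression of solutions below limit.

-- ===== PORT A =====
def almost_modular_inverse (a : Int) (remainder : Int) (mod : Int) (limit : Int) : List Int :=
  let lim := if limit = 0 then mod else limit
  (PySem.List.pyRange 0 lim 1).foldl
    (fun acc i => if PySem.Int.mod (a * i) mod = remainder then acc ++ [i] else acc) []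

-- ===== PORT B =====
-- termination measure for the Euclid recursion (cited by egcd's decreasing_by)
theorem pymod_natAbs_lt (a b : Int) (hb : ¬ b = 0) :
    (PySem.Int.mod a b).natAbs < b.natAbs := by
  rcases lt_or_gt_of_ne hb with h | h
  · have := PySem.Int.mod_neg_bounds a h; omega
  · have h1 := PySem.Int.mod_nonneg a h; have h2 := PySem.Int.mod_lt a h; omega

-- _egcd from Source B: returns (g, x, y) with a*x + b*y = g
def egcd (a b : Int) : Int × Int × Int :=
  if hb : b = 0 then (a, 1, 0)
  else
    let t := egcd b (PySem.Int.mod a b)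
    (t.1, t.2.2, t.2.1 - PySem.Int.floordiv a b * t.2.2)
termination_by b.natAbs
decreasing_by exact pymod_natAbs_lt a b hb

def almost_modular_inverse_alt (a : Int) (remainder : Int) (mod : Int) (limit : Int) : List Int :=
  let lim := if limit = 0 then mod else limit
  if lim ≤ 0 then []
  else if 0 < mod ∧ ¬(0 ≤ remainder ∧ remainder < mod) then []
  else if ¬ 0 < mod ∧ ¬(mod < remainder ∧ remainder ≤ 0) then []
  else
    let m := |mod|
    let r := PySem.Int.mod remainder m
    let t := egcd (PySem.Int.mod a m) m
    let g := t.1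
    let x := t.2.1
    if ¬ PySem.Int.mod r g = 0 then []
    else
      let step := PySem.Int.floordiv m g
      let x0 := PySem.Int.mod (PySem.Int.floordiv r g * x) step
      PySem.List.pyRange x0 lim step

-- ===== PRECONDITION & SPEC =====
-- Pre_ excludes exactly the inputs where A raises ZeroDivisionError: mod = 0 with a positive limit.
def Pre_almost_modular_inverse (a : Int) (remainder : Int) (mod : Int) (limit : Int) : Prop :=
  ¬ (mod = 0 ∧ 0 < limit)
instance (a : Int) (remainder : Int) (mod : Int) (limit : Int) : Decidable (Pre_almost_modular_inverse a remainder mod limit) := by unfold Pre_almost_modular_inverse; infer_instance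

def pvWitness_almost_modular_inverse : Int × Int × Int × Int := (3, 2, 5, 0)

def Spec_almost_modular_inverse (a : Int) (remainder : Int) (mod : Int) (limit : Int) (out : List Int) : Prop := out = almost_modular_inverse_alt a remainder mod limit
instance (a : Int) (remainder : Int) (mod : Int) (limit : Int) (out : List Int) : Decidable (Spec_almost_modular_inverse a remainder mod limit out) := by unfold Spec_almost_modular_inverse; infer_instance

-- ===== CLAIM (what is proved, stated in full; the proofs are below) =====
def Claim_equal_almost_modular_inverse : Prop := ∀ (a : Int) (remainder : Int) (mod : Int) (limit : Int), Dom_almost_modular_inverse a remainder mod limit → Pre_almost_modular_inverse a remainder mod limit → Spec_almost_modular_inverse a remainder mod limit (almost_modular_inverse a remainder mod limit)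


-- ===== LEMMAS AND PROOFS =====

-- Python '%': value characterisation (divisor b ≠ 0): pymod v b = w iff w is in the canonical
-- half-open interval for b and b divides v - w.
theorem pymod_eq_iff (v w b : Int) (hb : b ≠ 0) :
    PySem.Int.mod v b = w ↔
      ((if 0 < b then 0 ≤ w ∧ w < b else b < w ∧ w ≤ 0) ∧ b ∣ v - w) := by
  have hqr := PySem.Int.floordiv_mul_add_mod v b
  constructor
  · rintro rfl
    constructor
    · split_ifs with h
      · exact ⟨PySem.Int.mod_nonneg v h, PySem.Int.mod_lt v h⟩
      · exact PySem.Int.mod_neg_bounds v (by omega)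
    · exact ⟨PySem.Int.floordiv v b, by linarith [mul_comm (PySem.Int.floordiv v b) b]⟩
  · rintro ⟨hw, c, hc⟩
    have hd : b ∣ PySem.Int.mod v b - w := by
      refine ⟨c - PySem.Int.floordiv v b, ?_⟩
      have : b * c = v - w := hc.symm
      nlinarith [mul_comm (PySem.Int.floordiv v b) b, mul_sub b c (PySem.Int.floordiv v b)]
    have hz : PySem.Int.mod v b - w = 0 := by
      apply Int.eq_zero_of_abs_lt_dvd ((abs_dvd b _).mpr hd)
      rcases lt_or_gt_of_ne hb with h | h
      · have := PySem.Int.mod_neg_bounds v h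
        simp only [if_neg (by omega : ¬ 0 < b)] at hw
        rw [abs_of_neg h] at *
        rw [abs_lt]; omega
      · have h1 := PySem.Int.mod_nonneg v h; have h2 := PySem.Int.mod_lt v h
        simp only [if_pos h] at hw
        rw [abs_of_pos h]; rw [abs_lt]; omega
    omega

-- extended-Euclid correctness: common divisor, Bézout identity, positivity
theorem egcd_spec : ∀ (n : Nat) (a b : Int), b.natAbs = n → 0 ≤ a → 0 ≤ b →
    (egcd a b).1 ∣ a ∧ (egcd a b).1 ∣ b ∧
    a * (egcd a b).2.1 + b * (egcd a b).2.2 = (egcd a b).1 ∧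
    (0 < a ∨ 0 < b → 0 < (egcd a b).1) := by
  intro n
  induction n using Nat.strong_induction_on with
  | _ n ih =>
    intro a b hn ha hb
    by_cases h0 : b = 0
    · rw [egcd, dif_pos h0]
      subst h0
      refine ⟨dvd_refl a, dvd_zero a, by ring, ?_⟩
      rintro (h | h)
      · exact h
      · omega
    · rw [egcd, dif_neg h0]
      have hbpos : 0 < b := lt_of_le_of_ne hb (Ne.symm h0)
      have hm1 := PySem.Int.mod_nonneg a hbpos
      have hm2 := PySem.Int.mod_lt a hbpos
      have hrec := ih (PySem.Int.mod a b).natAbs (by omega) b (PySem.Int.mod a b) rfl hb hm1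
      obtain ⟨hd1, hd2, hbez, hpos⟩ := hrec
      have hqr := PySem.Int.floordiv_mul_add_mod a b
      refine ⟨?_, hd1, ?_, fun _ => hpos (Or.inl hbpos)⟩
      · -- g ∣ a since a = q*b + (a mod b)
        have hsum : (egcd b (PySem.Int.mod a b)).1 ∣ PySem.Int.floordiv a b * b + PySem.Int.mod a b :=
          dvd_add (Dvd.dvd.mul_left hd1 _) hd2
        rwa [hqr] at hsum
      · -- Bézout
        set t := egcd b (PySem.Int.mod a b)
        have : a * t.2.2 + b * (t.2.1 - PySem.Int.floordiv a b * t.2.2)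
            = b * t.2.1 + PySem.Int.mod a b * t.2.2 := by
          have hma : PySem.Int.mod a b = a - PySem.Int.floordiv a b * b := by linarith
          rw [hma]; ring
        rw [this, hbez]

-- the arithmetic-progression extraction: filtering a contiguous range by a residue class
theorem filter_range_eq_progression (x0 lim step : Int) (hstep : 0 < step)
    (h0 : 0 ≤ x0) (h1 : x0 < step) :
    List.filter (fun i => decide (step ∣ i - x0)) (PySem.List.pyRange 0 lim 1)
      = PySem.List.pyRange x0 lim step := by
  have hnl : (List.filter (fun i => decide (step ∣ i - x0)) (PySem.List.pyRange 0 lim 1)).Pairwise (· < ·) :=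
    List.Pairwise.filter _ (PySem.List.pairwise_lt_pyRange_one 0 lim)
  have hnr : (PySem.List.pyRange x0 lim step).Pairwise (· < ·) := by
    rw [PySem.List.pyRange_of_pos x0 lim hstep]
    refine List.Pairwise.map _ ?_ List.pairwise_lt_range
    intro k1 k2 hk
    have : step * (k1 : Int) < step * (k2 : Int) := by
      apply mul_lt_mul_of_pos_left _ hstep
      exact_mod_cast hk
    omega
  have hmem : ∀ i : Int, (i ∈ List.filter (fun i => decide (step ∣ i - x0)) (PySem.List.pyRange 0 lim 1))
      ↔ i ∈ PySem.List.pyRange x0 lim step := by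
    intro i
    rw [List.mem_filter, PySem.List.mem_pyRange_one, PySem.List.mem_pyRange_iff_of_pos hstep,
      decide_eq_true_eq]
    constructor
    · rintro ⟨⟨hi0, hil⟩, t, ht⟩
      refine ⟨?_, hil, ⟨t, ht⟩⟩
      rcases le_or_gt x0 i with h | h
      · exact h
      · exfalso
        have htn : t ≤ -1 := by nlinarith
        nlinarith
    · rintro ⟨hix, hil, hd⟩
      exact ⟨⟨by omega, hil⟩, hd⟩
  have hperm := (List.perm_ext_iff_of_nodup
    (hnl.imp (fun {a b} h => ne_of_lt h)) (hnr.imp (fun {a b} h => ne_of_lt h))).mpr hmem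
  exact List.eq_of_perm_of_sorted
    (fun a b _ _ hab hba => le_antisymm hab hba)
    (hnl.imp (fun {a b} h => le_of_lt h))
    (hnr.imp (fun {a b} h => le_of_lt h)) hperm

-- Bézout witness for the particular solution x0 of the congruence
theorem key_solution (g a'' m' r' x y q x0 : Int)
    (hcop : a'' * x + m' * y = 1) (hx0 : x0 = r' * x - q * m') :
    (g * m') ∣ (g * a'') * x0 - g * r' := by
  refine ⟨-(r' * y) - a'' * q, ?_⟩
  subst hx0
  linear_combination (g * r') * hcop

-- ===== VERDICT (by name: the statement is the Claim_ definition above) =====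
theorem almost_modular_inverse_spec : Claim_equal_almost_modular_inverse := by
  intro a rem mod limit _ hpre
  unfold Spec_almost_modular_inverse almost_modular_inverse almost_modular_inverse_alt
  rw [PySem.List.foldl_append_ite_eq_filter (fun i => PySem.Int.mod (a * i) mod = rem)]
  rw [List.nil_append]
  set lim := if limit = 0 then mod else limit with hlimdef
  by_cases hl : lim ≤ 0
  · rw [if_pos hl, PySem.List.pyRange_one_eq_nil hl, List.filter_nil]
  · rw [if_neg hl]
    rw [not_le] at hl
    have hm : mod ≠ 0 := by
      by_cases hl0 : limit = 0
      · have : lim = mod := by rw [hlimdef, if_pos hl0]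
        omega
      · have : lim = limit := by rw [hlimdef, if_neg hl0]
        unfold Pre_almost_modular_inverse at hpre
        omega
    by_cases hin : (if 0 < mod then 0 ≤ rem ∧ rem < mod else mod < rem ∧ rem ≤ 0)
    · -- remainder in the canonical residue range: B may still find no or some solutions
      have hguard1 : ¬ (0 < mod ∧ ¬(0 ≤ rem ∧ rem < mod)) := by
        by_cases h : 0 < mod
        · rw [if_pos h] at hin; tauto
        · tauto
      have hguard2 : ¬ (¬ 0 < mod ∧ ¬(mod < rem ∧ rem ≤ 0)) := by
        by_cases h : 0 < mod
        · tauto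
        · rw [if_neg h] at hin; tauto
      rw [if_neg hguard1, if_neg hguard2]
      have hm0 : 0 < |mod| := abs_pos.mpr hm
      have ha'0 := PySem.Int.mod_nonneg a hm0
      have ha'1 := PySem.Int.mod_lt a hm0
      obtain ⟨hga, hgm, hbez, hgpos'⟩ :=
        egcd_spec (|mod|).natAbs (PySem.Int.mod a |mod|) |mod| rfl ha'0 (le_of_lt hm0)
      have hgpos : 0 < (egcd (PySem.Int.mod a |mod|) |mod|).1 := hgpos' (Or.inr hm0)
      -- P i ↔ |mod| ∣ a*i - rem
      have hPiff : ∀ i : Int, (PySem.Int.mod (a * i) mod = rem) ↔ |mod| ∣ (a * i - rem) := by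
        intro i
        rw [pymod_eq_iff _ _ _ hm, abs_dvd]
        exact ⟨fun h => h.2, fun h => ⟨hin, h⟩⟩
      have hda : |mod| ∣ a - PySem.Int.mod a |mod| := by
        refine ⟨PySem.Int.floordiv a |mod|, ?_⟩
        have := PySem.Int.floordiv_mul_add_mod a |mod|
        linarith [mul_comm (PySem.Int.floordiv a |mod|) |mod|]
      have hdr : |mod| ∣ rem - PySem.Int.mod rem |mod| := by
        refine ⟨PySem.Int.floordiv rem |mod|, ?_⟩
        have := PySem.Int.floordiv_mul_add_mod rem |mod|
        linarith [mul_comm (PySem.Int.floordiv rem |mod|) |mod|]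
      by_cases hsol : PySem.Int.mod (PySem.Int.mod rem |mod|) (egcd (PySem.Int.mod a |mod|) |mod|).1 = 0
      · -- solvable: B emits the arithmetic progression
        rw [if_neg (not_not_intro hsol)]
        set g := (egcd (PySem.Int.mod a |mod|) |mod|).1 with hgdef
        set x := (egcd (PySem.Int.mod a |mod|) |mod|).2.1 with hxdef
        set y := (egcd (PySem.Int.mod a |mod|) |mod|).2.2 with hydef
        obtain ⟨m', hmm'⟩ := hgm
        obtain ⟨a'', haa''⟩ := hga
        obtain ⟨r', hrr'⟩ := (PySem.Int.mod_eq_zero_iff_dvd _ _).mp hsol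
        have hg0 : g ≠ 0 := ne_of_gt hgpos
        have hm'pos : 0 < m' := by nlinarith
        have hstep : PySem.Int.floordiv |mod| g = m' := by
          rw [PySem.Int.floordiv_eq_ediv_of_pos hgpos, hmm', Int.mul_ediv_cancel_left _ hg0]
        have hrdiv : PySem.Int.floordiv (PySem.Int.mod rem |mod|) g = r' := by
          rw [PySem.Int.floordiv_eq_ediv_of_pos hgpos, hrr', Int.mul_ediv_cancel_left _ hg0]
        rw [hstep, hrdiv]
        set x0 := PySem.Int.mod (r' * x) m' with hx0def
        have hx0a := PySem.Int.mod_nonneg (r' * x) hm'pos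
        have hx0b := PySem.Int.mod_lt (r' * x) hm'pos
        have hx0eq : x0 = r' * x - PySem.Int.floordiv (r' * x) m' * m' := by
          have := PySem.Int.floordiv_mul_add_mod (r' * x) m'
          linarith
        -- cancelled Bézout identity: a''*x + m'*y = 1
        have hcop : a'' * x + m' * y = 1 := by
          have h1 : g * (a'' * x + m' * y) = g * 1 := by
            rw [mul_one]
            calc g * (a'' * x + m' * y) = (g * a'') * x + (g * m') * y := by ring
            _ = PySem.Int.mod a |mod| * x + |mod| * y := by rw [← haa'', ← hmm']
            _ = g := hbez
          exact mul_left_cancel₀ hg0 h1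
        have hsolution : |mod| ∣ PySem.Int.mod a |mod| * x0 - PySem.Int.mod rem |mod| := by
          rw [haa'', hrr', hmm']
          exact key_solution g a'' m' r' x y _ x0 hcop hx0eq
        -- full characterisation of the solution set
        have hkey : ∀ i : Int, (PySem.Int.mod (a * i) mod = rem) ↔ m' ∣ (i - x0) := by
          intro i
          rw [hPiff i]
          constructor
          · intro h
            have hdiff : |mod| ∣ (a * i - rem) - (PySem.Int.mod a |mod| * i - PySem.Int.mod rem |mod|) := by
              have e : (a * i - rem) - (PySem.Int.mod a |mod| * i - PySem.Int.mod rem |mod|)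
                  = (a - PySem.Int.mod a |mod|) * i - (rem - PySem.Int.mod rem |mod|) := by ring
              rw [e]
              exact dvd_sub (hda.mul_right i) hdr
            have h2 : |mod| ∣ PySem.Int.mod a |mod| * i - PySem.Int.mod rem |mod| := by
              have h3 := dvd_sub h hdiff
              have e : (a * i - rem) - ((a * i - rem) - (PySem.Int.mod a |mod| * i - PySem.Int.mod rem |mod|))
                  = PySem.Int.mod a |mod| * i - PySem.Int.mod rem |mod| := by ring
              rwa [e] at h3
            have h4 : |mod| ∣ PySem.Int.mod a |mod| * (i - x0) := by
              have h5 := dvd_sub h2 hsolution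
              have e : (PySem.Int.mod a |mod| * i - PySem.Int.mod rem |mod|)
                  - (PySem.Int.mod a |mod| * x0 - PySem.Int.mod rem |mod|)
                  = PySem.Int.mod a |mod| * (i - x0) := by ring
              rwa [e] at h5
            rw [haa'', hmm'] at h4
            have h6 : m' ∣ a'' * (i - x0) := by
              have e : g * a'' * (i - x0) = g * (a'' * (i - x0)) := by ring
              rw [e] at h4
              exact (mul_dvd_mul_iff_left hg0).mp h4
            have hc : IsCoprime m' a'' := ⟨y, x, by linear_combination hcop⟩
            exact hc.dvd_of_dvd_mul_left h6
          · rintro ⟨t, ht⟩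
            have h2 : |mod| ∣ PySem.Int.mod a |mod| * (i - x0) := by
              refine ⟨a'' * t, ?_⟩
              rw [haa'', hmm', ht]; ring
            have h3 : |mod| ∣ PySem.Int.mod a |mod| * i - PySem.Int.mod rem |mod| := by
              have h4 := dvd_add h2 hsolution
              have e : PySem.Int.mod a |mod| * (i - x0) + (PySem.Int.mod a |mod| * x0 - PySem.Int.mod rem |mod|)
                  = PySem.Int.mod a |mod| * i - PySem.Int.mod rem |mod| := by ring
              rwa [e] at h4
            have hdiff : |mod| ∣ (a * i - rem) - (PySem.Int.mod a |mod| * i - PySem.Int.mod rem |mod|) := by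
              have e : (a * i - rem) - (PySem.Int.mod a |mod| * i - PySem.Int.mod rem |mod|)
                  = (a - PySem.Int.mod a |mod|) * i - (rem - PySem.Int.mod rem |mod|) := by ring
              rw [e]
              exact dvd_sub (hda.mul_right i) hdr
            have h5 := dvd_add hdiff h3
            have e : ((a * i - rem) - (PySem.Int.mod a |mod| * i - PySem.Int.mod rem |mod|))
                + (PySem.Int.mod a |mod| * i - PySem.Int.mod rem |mod|) = a * i - rem := by ring
            rwa [e] at h5
        have hfil : List.filter (fun i => decide (PySem.Int.mod (a * i) mod = rem)) (PySem.List.pyRange 0 lim 1)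
            = List.filter (fun i => decide (m' ∣ i - x0)) (PySem.List.pyRange 0 lim 1) := by
          apply List.filter_congr
          intro i _
          rw [decide_eq_decide]
          exact hkey i
        rw [hfil]
        exact filter_range_eq_progression x0 lim m' hm'pos hx0a hx0b
      · -- unsolvable: both sides are empty
        rw [if_pos hsol]
        apply List.filter_eq_nil_iff.mpr
        intro i _
        rw [decide_eq_true_eq]
        intro hP
        apply hsol
        rw [PySem.Int.mod_eq_zero_iff_dvd]
        set g := (egcd (PySem.Int.mod a |mod|) |mod|).1
        have hdvd : |mod| ∣ a * i - rem := (hPiff i).mp hP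
        have hga' : g ∣ a := by
          have h1 : g ∣ a - PySem.Int.mod a |mod| := dvd_trans hgm hda
          have h2 := dvd_add h1 hga
          have e : (a - PySem.Int.mod a |mod|) + PySem.Int.mod a |mod| = a := by ring
          rwa [e] at h2
        have hgrem : g ∣ rem := by
          have h1 := dvd_sub (hga'.mul_right i) (dvd_trans hgm hdvd)
          have e : a * i - (a * i - rem) = rem := by ring
          rwa [e] at h1
        have h2 := dvd_sub hgrem (dvd_trans hgm hdr)
        have e : rem - (rem - PySem.Int.mod rem |mod|) = PySem.Int.mod rem |mod| := by ring
        rwa [e] at h2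
    · -- remainder outside the value range of '% mod': both sides are empty
      have hbranch : (if 0 < mod ∧ ¬(0 ≤ rem ∧ rem < mod) then ([] : List Int)
          else if ¬ 0 < mod ∧ ¬(mod < rem ∧ rem ≤ 0) then []
          else
            let m := |mod|
            let r := PySem.Int.mod rem m
            let t := egcd (PySem.Int.mod a m) m
            let g := t.1
            let x := t.2.1
            if ¬ PySem.Int.mod r g = 0 then []
            else
              let step := PySem.Int.floordiv m g
              let x0 := PySem.Int.mod (PySem.Int.floordiv r g * x) step
              PySem.List.pyRange x0 lim step) = [] := by
        by_cases h : 0 < mod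
        · rw [if_pos ⟨h, fun hc => hin (by rw [if_pos h]; exact hc)⟩]
        · rw [if_neg (by tauto), if_pos ⟨h, fun hc => hin (by rw [if_neg h]; exact hc)⟩]
      rw [hbranch]
      apply List.filter_eq_nil_iff.mpr
      intro i _
      rw [decide_eq_true_eq]
      intro hP
      exact hin ((pymod_eq_iff _ _ _ hm).mp hP).1
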